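-- pv_equiv track=rewrite | github.com/paulmoise/argumentation-en-ia | main.py | get_conflict_nodes
-- ===== SOURCE A (Python) =====
-- def get_conflict_nodes(nodes, possible_axes_solutions):
--     conflictual_nodes = []
--     for node in nodes:
--         labels = []
--         for s in possible_axes_solutions:
--             label = s.get(node, None)
--             if label is not None:
--                 labels.append(label)
--         if len(labels) > 1 and not all(x == labels[0] for x in labels):
--             conflictual_nodes.append(node)
--     return conflictual_nodes
-- ===== SOURCE B (Python) =====
-- def get_conflict_nodes(nodes, possible_axes_solutions):
--     # One pass over all solution entries: per node keep (first label, differs?, count),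
--     # then a membership test per node -- O(nodes + total entries) instead of O(nodes * solutions).
--     stats = {}
--     for s in possible_axes_solutions:
--         for k, v in s.items():
--             prev = stats.get(k)
--             if prev is None:
--                 stats[k] = (v, False, 1)
--             else:
--                 first, differs, cnt = prev
--                 stats[k] = (first, differs or v != first, cnt + 1)
--     conflicts = {k for k, (first, differs, cnt) in stats.items() if cnt > 1 and differs}
--     return [n for n in nodes if n in conflicts]
-- ===== Notes on version B (the rewrite author's own statement) =====
-- stated objective: faster
-- what changed: Instead of scanning every solution dict once per node (O(nodes*solutions) lookups), B makes a single pass over all solution entries building per-node (first label, differs flag, count) and then filters nodes by one set-membership test each.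
import Mathlib
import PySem

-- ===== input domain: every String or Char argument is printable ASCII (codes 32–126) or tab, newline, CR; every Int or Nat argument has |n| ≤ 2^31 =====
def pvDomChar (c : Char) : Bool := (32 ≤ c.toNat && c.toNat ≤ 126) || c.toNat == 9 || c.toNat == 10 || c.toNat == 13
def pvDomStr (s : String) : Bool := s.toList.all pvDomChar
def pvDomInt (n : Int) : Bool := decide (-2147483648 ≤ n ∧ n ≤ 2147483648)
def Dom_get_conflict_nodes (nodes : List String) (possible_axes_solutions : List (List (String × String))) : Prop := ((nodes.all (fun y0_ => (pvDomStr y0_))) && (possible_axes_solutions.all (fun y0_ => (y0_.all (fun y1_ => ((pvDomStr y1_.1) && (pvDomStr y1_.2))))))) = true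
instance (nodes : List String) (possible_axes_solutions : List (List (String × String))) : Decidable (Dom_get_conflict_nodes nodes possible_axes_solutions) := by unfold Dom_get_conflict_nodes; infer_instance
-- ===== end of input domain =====

-- B replaces A's per-node scan over every solution dict by one pass over all solution
-- entries building per-node (first label, differs flag, count); measured objective: faster.

-- ===== PORT A =====
def get_conflict_nodes (nodes : List String) (possible_axes_solutions : List (List (String × String))) : List String :=
  nodes.foldl (fun conflictual_nodes node =>
    let labels := possible_axes_solutions.foldl (fun labels s =>
      match (PySem.Dict.mk s).get? node with   -- s.get(node, None)
      | some label => labels ++ [label]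
      | none => labels) []
    -- labels[0] is only evaluated when len(labels) > 1, hence headD is exact here
    if 1 < labels.length && !(labels.all (fun x => x == labels.headD "")) then
      conflictual_nodes ++ [node]
    else conflictual_nodes) []

-- ===== PORT B =====
-- one solution entry (k, v): stats[k] = (v, False, 1) if unseen, else (first, differs or v != first, cnt+1)
def pvStep (stats : PySem.Dict String (String × Bool × Int)) (p : String × String) :
    PySem.Dict String (String × Bool × Int) :=
  stats.insert p.1 (match stats.get? p.1 with
    | none => (p.2, false, 1)
    | some (first, differs, cnt) => (first, differs || (p.2 != first), cnt + 1))

def get_conflict_nodes_alt (nodes : List String) (possible_axes_solutions : List (List (String × String))) : List String :=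
  let stats := possible_axes_solutions.foldl (fun st s => s.foldl pvStep st) PySem.Dict.empty
  let conflicts : PySem.Set String :=
    PySem.Set.ofList (((stats.items.filter (fun p => 1 < p.2.2.2 && p.2.2.1)).map (·.1)))
  nodes.filter (fun n => conflicts.contains n)

-- ===== PRECONDITION & SPEC =====
-- Pre_ excludes inner lists with duplicate keys: under the type convention each inner list
-- represents a Python dict, and a Python dict can never contain a duplicate key, so such
-- lists represent no input A is ever run on.
def Pre_get_conflict_nodes (nodes : List String) (possible_axes_solutions : List (List (String × String))) : Prop :=
  ∀ s ∈ possible_axes_solutions, (s.map Prod.fst).Nodup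
instance (nodes : List String) (possible_axes_solutions : List (List (String × String))) : Decidable (Pre_get_conflict_nodes nodes possible_axes_solutions) := by unfold Pre_get_conflict_nodes; infer_instance
def pvWitness_get_conflict_nodes : List String × (List (List (String × String))) :=
  (["a", "b"], [[("a", "in"), ("b", "out")], [("a", "out")]])

def Spec_get_conflict_nodes (nodes : List String) (possible_axes_solutions : List (List (String × String))) (out : List String) : Prop := out = get_conflict_nodes_alt nodes possible_axes_solutions
instance (nodes : List String) (possible_axes_solutions : List (List (String × String))) (out : List String) : Decidable (Spec_get_conflict_nodes nodes possible_axes_solutions out) := by unfold Spec_get_conflict_nodes; infer_instance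

-- ===== CLAIM (what is proved, stated in full; the proofs are below) =====
def Claim_equal_get_conflict_nodes : Prop := ∀ (nodes : List String) (possible_axes_solutions : List (List (String × String))), Dom_get_conflict_nodes nodes possible_axes_solutions → Pre_get_conflict_nodes nodes possible_axes_solutions → Spec_get_conflict_nodes nodes possible_axes_solutions (get_conflict_nodes nodes possible_axes_solutions)

-- ===== LEMMAS AND PROOFS =====

-- the labels A collects for one node, and the update function B's stats applies per label
def pvLabels (sols : List (List (String × String))) (n : String) : List String :=
  sols.flatMap (fun s => (s.filter (fun p => p.1 == n)).map Prod.snd)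

def pvUpd (o : Option (String × Bool × Int)) (v : String) : Option (String × Bool × Int) :=
  some (match o with
    | none => (v, false, 1)
    | some (first, differs, cnt) => (first, differs || (v != first), cnt + 1))

theorem pvStep_get? (d : PySem.Dict String (String × Bool × Int)) (p : String × String) (n : String) :
    (pvStep d p).get? n = if p.1 = n then pvUpd (d.get? n) p.2 else d.get? n := by
  unfold pvStep pvUpd
  rcases p with ⟨k, v⟩
  by_cases h : k = n
  · subst h; simp [PySem.Dict.get?_insert_self]
  · rw [if_neg h]
    exact PySem.Dict.get?_insert_of_ne _ _ (Ne.symm h)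

theorem pvFold_get? (E : List (String × String)) (d : PySem.Dict String (String × Bool × Int)) (n : String) :
    (E.foldl pvStep d).get? n =
      (((E.filter (fun p => p.1 == n)).map Prod.snd).foldl pvUpd (d.get? n)) := by
  induction E generalizing d with
  | nil => rfl
  | cons p E ih =>
    rcases p with ⟨k, v⟩
    by_cases h : k = n
    · subst h
      simp [List.foldl_cons, ih, pvStep_get?]
    · simp [List.foldl_cons, ih, pvStep_get?, h]

theorem pvUpd_some (L : List String) (f : String) (df : Bool) (c : Int) :
    L.foldl pvUpd (some (f, df, c)) = some (f, df || L.any (fun v => v != f), c + L.length) := by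
  induction L generalizing df c with
  | nil => simp
  | cons v L ih =>
    simp only [List.foldl_cons, pvUpd, List.any_cons, ih, List.length_cons,
      Option.some.injEq, Prod.mk.injEq]
    refine ⟨trivial, by rw [Bool.or_assoc], by push_cast; ring⟩

theorem pvUpd_none (L : List String) :
    L.foldl pvUpd none =
      match L with
      | [] => none
      | v :: rest => some (v, rest.any (fun x => x != v), 1 + rest.length) := by
  cases L with
  | nil => rfl
  | cons v rest => simp [pvUpd, pvUpd_some]

-- A's inner loop collects exactly pvLabels, given duplicate-free dict keys
theorem pvAGet_toList (s : List (String × String)) (n : String) (h : (s.map Prod.fst).Nodup) :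
    ((PySem.Dict.mk s).get? n).toList = (s.filter (fun p => p.1 == n)).map Prod.snd := by
  induction s with
  | nil => rfl
  | cons p s ih =>
    rcases p with ⟨k, v⟩
    simp only [List.map_cons, List.nodup_cons] at h
    rw [PySem.Dict.get?_mk_cons]
    by_cases hk : k = n
    · subst hk
      have : s.filter (fun p => p.1 == k) = [] := by
        rw [List.filter_eq_nil_iff]
        intro p hp hpk
        have hpk' : p.1 = k := by simpa using hpk
        exact h.1 (hpk' ▸ List.mem_map_of_mem (f := Prod.fst) hp)
      simp [this]
    · simp only [List.filter_cons]
      simp [hk, ih h.2]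

theorem pvLabelsA (sols : List (List (String × String))) (n : String)
    (h : ∀ s ∈ sols, (s.map Prod.fst).Nodup) :
    sols.foldl (fun labels s =>
      match (PySem.Dict.mk s).get? n with
      | some label => labels ++ [label]
      | none => labels) [] = pvLabels sols n := by
  have step : ∀ (sols : List (List (String × String))) (acc : List String),
      (∀ s ∈ sols, (s.map Prod.fst).Nodup) →
      sols.foldl (fun labels s =>
        match (PySem.Dict.mk s).get? n with
        | some label => labels ++ [label]
        | none => labels) acc = acc ++ pvLabels sols n := by
    intro sols
    induction sols with
    | nil => intro acc _; simp [pvLabels]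
    | cons s sols ih =>
      intro acc hs
      simp only [List.foldl_cons]
      have hsn : ((PySem.Dict.mk s).get? n).toList = (s.filter (fun p => p.1 == n)).map Prod.snd :=
        pvAGet_toList s n (hs s (by simp))
      have hm : (match (PySem.Dict.mk s).get? n with
              | some label => acc ++ [label]
              | none => acc) = acc ++ ((PySem.Dict.mk s).get? n).toList := by
        cases (PySem.Dict.mk s).get? n <;> simp
      rw [hm, hsn, ih _ (fun t ht => hs t (List.mem_cons_of_mem _ ht))]
      simp [pvLabels, List.flatMap_cons, List.append_assoc]
  exact step sols [] h

-- B's stats lookup, characterised through pvLabels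
theorem pvStats_get (sols : List (List (String × String))) (n : String) :
    (sols.foldl (fun st s => s.foldl pvStep st) PySem.Dict.empty).get? n
      = (pvLabels sols n).foldl pvUpd none := by
  rw [← List.foldl_flatten, pvFold_get?, PySem.Dict.get?_empty]
  congr 1
  simp [pvLabels, List.filter_flatten, List.map_flatten, List.map_map, List.flatMap_def]
  rfl

theorem pvStats_nodup (sols : List (List (String × String))) :
    (sols.foldl (fun st s => s.foldl pvStep st) PySem.Dict.empty).keys.Nodup := by
  rw [← List.foldl_flatten]
  exact PySem.Dict.nodup_keys_foldl_insert_key sols.flatten Prod.fst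
    (fun (d : PySem.Dict String (String × Bool × Int)) (p : String × String) =>
      (match d.get? p.1 with
      | none => (p.2, false, 1)
      | some (first, differs, cnt) => (first, differs || (p.2 != first), cnt + 1)))
    PySem.Dict.empty PySem.Dict.nodup_keys_empty

-- membership in the set built from filtered items, for a dict with duplicate-free keys
theorem pvContains (stats : PySem.Dict String (String × Bool × Int))
    (hnd : stats.keys.Nodup) (c : String × (String × Bool × Int) → Bool) (n : String) :
    (PySem.Set.ofList ((stats.items.filter c).map (·.1)) : PySem.Set String).contains n
      = (match stats.get? n with | none => false | some v => c (n, v)) := by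
  rw [Bool.eq_iff_iff, PySem.Set.contains_iff, PySem.Set.mem_ofList]
  constructor
  · intro h
    rcases List.mem_map.mp h with ⟨p, hp, hpn⟩
    rcases List.mem_filter.mp hp with ⟨hpi, hpc⟩
    obtain ⟨pk, pv⟩ := p
    simp only at hpn
    subst hpn
    have hg : stats.get? pk = some pv := PySem.Dict.get?_of_mem_items stats (by simpa using hpi) hnd
    rw [hg]
    exact hpc
  · intro h
    cases hg : stats.get? n with
    | none => rw [hg] at h; exact absurd h (by simp)
    | some v =>
      rw [hg] at h
      exact List.mem_map.mpr ⟨(n, v),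
        List.mem_filter.mpr ⟨(PySem.Dict.get?_eq_some_iff_mem_items stats n v hnd).mp hg, h⟩, rfl⟩

-- A's per-node condition equals B's per-node condition, over the common label list
theorem pvCond (L : List String) :
    (1 < L.length && !(L.all fun x => x == L.headD "")) =
      (match L.foldl pvUpd none with
       | none => false
       | some v => 1 < v.2.2 && v.2.1) := by
  rw [pvUpd_none]
  cases L with
  | nil => rfl
  | cons v rest =>
    cases rest with
    | nil => simp
    | cons w t =>
      rw [Bool.eq_iff_iff]
      simp [List.all_eq_not_any_not, bne]

-- ===== VERDICT (by name: the statement is the Claim_ definition above) =====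
theorem get_conflict_nodes_spec : Claim_equal_get_conflict_nodes := by
  intro nodes sols _ hpre
  unfold Spec_get_conflict_nodes get_conflict_nodes get_conflict_nodes_alt
  simp only [PySem.List.foldl_append_if]
  rw [List.map_id']
  apply List.filter_congr
  intro n _
  rw [pvLabelsA sols n hpre, pvContains _ (pvStats_nodup sols) _ n, pvStats_get, pvCond]
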